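-- pv_equiv track=rewrite | github.com/Scunl/Projet-AP2 | sheep.py | Gauche
-- ===== SOURCE A (Python) =====
-- def hor(tuples):
--     return tuples[0]
--
-- def Gauche(moutons, lst):
--     """Déplace vers l'ouest."""
--
--
--     moutons.sort(reverse=False, key=hor)
--
--     for i in range(len(moutons)):
--         x, y = moutons[i]
--         for j in range(len(lst[0])):
--             if x > 0 and lst[y][x - 1] != 1 and (x - 1, y) not in moutons:
--                 x -= 1
--             else:
--                 moutons[i] = (x, y)
--     return moutons
-- ===== SOURCE B (Python) =====
-- # B: per-row closed-form packing. For each row seen, precompute once a barrier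
-- # prefix array barr[c] = rightmost wall/edge boundary at or left of column c;
-- # each sheep's final column is then min(x, max(barr[x], last_settled_in_row+1))
-- # in O(1), with a running per-row max of settled columns -- no per-cell sliding
-- # and no membership scan at all. Mutates `moutons` in place like A (sort +
-- # entry rewrite); equivalence is about the return value.
-- def hor(tuples):
--     return tuples[0]
--
-- def Gauche(moutons, lst):
--     moutons.sort(reverse=False, key=hor)
--     barr = {}
--     last = {}
--     for i, (x, y) in enumerate(moutons):
--         if x <= 0:
--             nx = x
--         else:
--             if y not in barr:
--                 row = lst[y]
--                 b = [0] * (len(row) + 1)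
--                 for c in range(1, len(row) + 1):
--                     b[c] = c if row[c - 1] == 1 else b[c - 1]
--                 barr[y] = b
--             cand = barr[y][x]
--             if y in last and last[y] + 1 > cand:
--                 cand = last[y] + 1
--             nx = cand if cand < x else x
--         last[y] = nx
--         moutons[i] = (nx, y)
--     return moutons
-- ===== Notes on version B (the rewrite author's own statement) =====
-- stated objective: faster
-- what changed: A slides every sheep cell by cell (len(lst[0]) iterations, each with an O(n) membership scan of the whole sheep list); B never slides at all: per row it precomputes once a barrier prefix array barr[c] (rightmost wall/west-edge boundary at or left of column c) and keeps a running max of settled columns, so each sheep's final column is the closed formula min(x, max(barr[x], last+1)) in O(1).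
-- outside the precondition, e.g. on Gauche([(2, 1)], [[0], [0, 0, 0]]): A returns [(2, 1)], B returns [(0, 1)]
import Mathlib
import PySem

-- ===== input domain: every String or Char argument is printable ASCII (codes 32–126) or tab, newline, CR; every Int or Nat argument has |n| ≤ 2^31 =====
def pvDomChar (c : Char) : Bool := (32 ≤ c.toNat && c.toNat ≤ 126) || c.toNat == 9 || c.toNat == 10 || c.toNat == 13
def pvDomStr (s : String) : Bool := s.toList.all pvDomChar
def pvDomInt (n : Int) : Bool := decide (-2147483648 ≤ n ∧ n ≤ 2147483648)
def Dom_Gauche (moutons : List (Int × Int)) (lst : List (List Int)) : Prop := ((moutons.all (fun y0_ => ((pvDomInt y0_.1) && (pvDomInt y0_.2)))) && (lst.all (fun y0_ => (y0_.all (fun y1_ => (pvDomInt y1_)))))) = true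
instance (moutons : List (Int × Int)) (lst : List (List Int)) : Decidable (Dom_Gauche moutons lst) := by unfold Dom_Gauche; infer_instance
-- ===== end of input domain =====

-- B replaces A's cell-by-cell slide (a whole-list membership scan at every step) by a
-- per-row barrier prefix array plus a running per-row max of settled columns: each final
-- position comes from the closed formula min(x, max(barr[x], last+1)). Both Pythons
-- sort/mutate `moutons` in place; the equivalence proved here is about the return value.

-- ===== PORT A =====
-- lst[y][x] (Python chained indexing, negative indices wrap); the default 1 is read only
-- where Python raises IndexError, which Pre_Gauche excludes.
def pvCell (lst : List (List Int)) (y x : Int) : Int :=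
  ((PySem.List.pyGet? lst y).bind (fun row => PySem.List.pyGet? row x)).getD 1

-- body of A's inner `for j in range(len(lst[0]))` loop; state = (x, moutons)
def pvAInner (lst : List (List Int)) (y : Int) (i : Nat) (st : Int × List (Int × Int)) :
    Int × List (Int × Int) :=
  if 0 < st.1 ∧ pvCell lst y (st.1 - 1) ≠ 1 ∧ ¬ (st.1 - 1, y) ∈ st.2 then
    (st.1 - 1, st.2)
  else
    (st.1, st.2.set i (st.1, y))

-- body of A's outer `for i in range(len(moutons))` loop
-- (`lst.getD 0 []` is lst[0]: under Pre_Gauche lst ≠ [] whenever the loop runs)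
def pvAOuter (lst : List (List Int)) (m : List (Int × Int)) (i : Nat) : List (Int × Int) :=
  let p := m.getD i (0, 0)          -- x, y = moutons[i]  (i < len(moutons): in range)
  ((List.range (lst.getD 0 []).length).foldl (fun st _ => pvAInner lst p.2 i st) (p.1, m)).2

def Gauche (moutons : List (Int × Int)) (lst : List (List Int)) : List (Int × Int) :=
  let m0 := PySem.List.sorted moutons (fun t => t.1)     -- moutons.sort(key=hor)
  (List.range m0.length).foldl (pvAOuter lst) m0

-- ===== PORT B =====
-- the barrier prefix array of one row: b = [0]*(len(row)+1); for c in range(1, len(row)+1):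
--   b[c] = c if row[c-1] == 1 else b[c-1]   (ported as the left-to-right fill it performs)
def pvBarrRow (row : List Int) : List Int :=
  (PySem.List.pyRange 1 ((row.length : Int) + 1) 1).foldl
    (fun b c => b ++ [if (PySem.List.pyGet? row (c - 1)).getD 0 = 1 then c
                      else (PySem.List.pyGet? b (c - 1)).getD 0]) [0]

-- `if y not in barr: barr[y] = <prefix array of lst[y]>`
def pvBarrOf (lst : List (List Int)) (barrD : PySem.Dict Int (List Int)) (y : Int) :
    PySem.Dict Int (List Int) :=
  if (barrD.get? y).isSome then barrD
  else barrD.insert y (pvBarrRow ((PySem.List.pyGet? lst y).getD []))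

-- `cand = barr[y][x]; if y in last and last[y] + 1 > cand: cand = last[y] + 1`
def pvCandOf (lastD : PySem.Dict Int Int) (y cand0 : Int) : Int :=
  match lastD.get? y with
  | some m => if cand0 < m + 1 then m + 1 else cand0
  | none => cand0

-- body of B's `for i, (x, y) in enumerate(moutons)` loop; state = (barr, last, out)
def pvBStep (lst : List (List Int))
    (st : PySem.Dict Int (List Int) × PySem.Dict Int Int × List (Int × Int))
    (p : Int × Int) :
    PySem.Dict Int (List Int) × PySem.Dict Int Int × List (Int × Int) :=
  if p.1 ≤ 0 then
    (st.1, st.2.1.insert p.2 p.1, st.2.2 ++ [(p.1, p.2)])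
  else
    let barr := pvBarrOf lst st.1 p.2
    let cand := pvCandOf st.2.1 p.2
      ((PySem.List.pyGet? ((barr.get? p.2).getD []) p.1).getD 0)    -- barr[y][x]
    let nx := if cand < p.1 then cand else p.1
    (barr, st.2.1.insert p.2 nx, st.2.2 ++ [(nx, p.2)])

def Gauche_alt (moutons : List (Int × Int)) (lst : List (List Int)) : List (Int × Int) :=
  let m0 := PySem.List.sorted moutons (fun t => t.1)
  (m0.foldl (pvBStep lst) (PySem.Dict.empty, PySem.Dict.empty, [])).2.2

-- ===== PRECONDITION & SPEC =====
-- Pre_Gauche excludes (a) inputs where A raises IndexError (empty lst with a sheep, a sheep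
-- column reaching past its row, an out-of-range row index) and (b) sheep starting at column
-- ≥ len(lst[0]): off-grid for the intended rectangular grid, A's width-bounded scan there
-- either raises or silently leaves the sheep unmoved.
def Pre_Gauche (moutons : List (Int × Int)) (lst : List (List Int)) : Prop :=
  ∀ p ∈ moutons, lst ≠ [] ∧ p.1 < ((lst.getD 0 []).length : Int) ∧
    (0 < p.1 → (PySem.List.pyGet? lst p.2).isSome ∧
      p.1 ≤ ((((PySem.List.pyGet? lst p.2).getD []).length : Int)))
instance (moutons : List (Int × Int)) (lst : List (List Int)) : Decidable (Pre_Gauche moutons lst) := by unfold Pre_Gauche; infer_instance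

def pvWitness_Gauche : (List (Int × Int)) × List (List Int) := ([(1, 0), (3, 0)], [[0, 0, 0, 0]])

def Spec_Gauche (moutons : List (Int × Int)) (lst : List (List Int)) (out : List (Int × Int)) : Prop := out = Gauche_alt moutons lst
instance (moutons : List (Int × Int)) (lst : List (List Int)) (out : List (Int × Int)) : Decidable (Spec_Gauche moutons lst out) := by unfold Spec_Gauche; infer_instance

-- ===== CLAIM (what is proved, stated in full; the proofs are below) =====
def Claim_equal_Gauche : Prop := ∀ (moutons : List (Int × Int)) (lst : List (List Int)), Dom_Gauche moutons lst → Pre_Gauche moutons lst → Spec_Gauche moutons lst (Gauche moutons lst)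

-- ===== LEMMAS AND PROOFS =====

-- the position where A's slide from x stops, as a recursion (proof-side abstraction of A)
def pvWalkL (lst : List (List Int)) (done : List (Int × Int)) (y x : Int) : Int :=
  if h : 0 < x ∧ pvCell lst y (x - 1) ≠ 1 ∧ ¬ (x - 1, y) ∈ done then
    pvWalkL lst done y (x - 1)
  else x
termination_by x.toNat
decreasing_by omega

-- the recursive specification of B's barrier array
def pvBarF (row : List Int) : Nat → Int
  | 0 => 0
  | k + 1 => if row.getD k 0 = 1 then (k : Int) + 1 else pvBarF row k

-- reading index done.length of done ++ q :: t gives q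
lemma pvGetShape (done t : List (Int × Int)) (q : Int × Int) :
    (done ++ q :: t).getD done.length (0, 0) = q := by
  simp [List.getD_eq_getElem?_getD]

-- a foldl over range with a body ignoring the index is an iterate
lemma pvFoldlRangeConst {α : Type} (g : α → α) (n : Nat) (s : α) :
    (List.range n).foldl (fun a _ => g a) s = g^[n] s := by
  induction n generalizing s with
  | zero => simp
  | succ n ih => simp [List.range_succ_eq_map, List.foldl_map, Function.iterate_succ_apply, ih]

-- membership of (z, y) in A's working list reduces to the settled prefix, for z strictly
-- left of the whole pending block (head column x0, remaining columns ≥ x0)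
lemma pvMemL (done t : List (Int × Int)) (y x0 z : Int)
    (Hp : ∀ q ∈ t, x0 ≤ q.1) (hz : z < x0) :
    ((z, y) ∈ done ++ (x0, y) :: t) ↔ (z, y) ∈ done := by
  simp only [List.mem_append, List.mem_cons]
  constructor
  · rintro (h | h | h)
    · exact h
    · exact absurd (congrArg Prod.fst h) (by simp; omega)
    · exact absurd (Hp _ h) (by simp; omega)
  · exact Or.inl

-- once the sheep is settled, further iterations of A's inner loop do nothing
lemma pvFixpoint (lst : List (List Int)) (done t : List (Int × Int))
    (y z : Int) (n : Nat)
    (hc : ¬ (0 < z ∧ pvCell lst y (z - 1) ≠ 1 ∧ ¬ (z - 1, y) ∈ done ++ (z, y) :: t)) :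
    (pvAInner lst y done.length)^[n] (z, done ++ (z, y) :: t) = (z, done ++ (z, y) :: t) := by
  induction n with
  | zero => rfl
  | succ n ih =>
    rw [Function.iterate_succ_apply]
    have : pvAInner lst y done.length (z, done ++ (z, y) :: t) = (z, done ++ (z, y) :: t) := by
      unfold pvAInner
      rw [if_neg hc]
      simp
    rw [this, ih]

-- A's inner loop from x (list entry still (x0, y)) settles the sheep at pvWalkL's stop
lemma pvInner (lst : List (List Int)) (done t : List (Int × Int)) (y x0 : Int)
    (Hp : ∀ q ∈ t, x0 ≤ q.1) :
    ∀ (n : Nat) (x : Int), x ≤ x0 → x < (n : Int) → (0 ≤ x ∨ x = x0) →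
    (pvAInner lst y done.length)^[n] (x, done ++ (x0, y) :: t)
      = (pvWalkL lst done y x, done ++ (pvWalkL lst done y x, y) :: t) := by
  intro n
  induction n with
  | zero =>
    intro x hx0 hn hnn
    have hx : x = x0 := by omega
    subst hx
    have hw : pvWalkL lst done y x = x := by
      rw [pvWalkL, dif_neg (fun h => absurd h.1 (by omega))]
    rw [Function.iterate_zero_apply, hw]
  | succ n ih =>
    intro x hx0 hn hnn
    rw [Function.iterate_succ_apply]
    by_cases hcond : 0 < x ∧ pvCell lst y (x - 1) ≠ 1 ∧ ¬ (x - 1, y) ∈ done ++ (x0, y) :: t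
    · -- A moves one step; so does the walk
      have hwalk : pvWalkL lst done y x = pvWalkL lst done y (x - 1) := by
        rw [pvWalkL]
        rw [dif_pos ?_]
        refine ⟨hcond.1, hcond.2.1, ?_⟩
        rw [← pvMemL done t y x0 (x - 1) Hp (by omega)]
        exact hcond.2.2
      have hstep : pvAInner lst y done.length (x, done ++ (x0, y) :: t)
          = (x - 1, done ++ (x0, y) :: t) := by
        unfold pvAInner; rw [if_pos hcond]
      rw [hstep, hwalk]
      exact ih (x - 1) (by omega) (by omega) (by omega)
    · -- A settles; the condition is false for the walk and stays false after the write
      have hwalk : pvWalkL lst done y x = x := by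
        rw [pvWalkL]
        rw [dif_neg ?_]
        intro ⟨h1, h2, h3⟩
        exact hcond ⟨h1, h2, by
          rw [pvMemL done t y x0 (x - 1) Hp (by omega)]; exact h3⟩
      have hstep : pvAInner lst y done.length (x, done ++ (x0, y) :: t)
          = (x, done ++ (x, y) :: t) := by
        unfold pvAInner; rw [if_neg hcond]; simp
      rw [hstep, hwalk]
      apply pvFixpoint
      intro ⟨h1, h2, h3⟩
      refine hcond ⟨h1, h2, ?_⟩
      rw [pvMemL done t y x0 (x - 1) Hp (by omega)]
      rw [← pvMemL done t y x (x - 1) (fun q hq => le_trans hx0 (Hp q hq)) (by omega)]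
      exact h3

-- the walk never moves right
lemma pvWalkLe (lst : List (List Int)) (done : List (Int × Int)) (y : Int) :
    ∀ (n : Nat) (x : Int), x.toNat = n → pvWalkL lst done y x ≤ x := by
  intro n
  induction n with
  | zero =>
    intro x hx
    rw [pvWalkL, dif_neg (fun h => by omega)]
  | succ n ih =>
    intro x hx
    rw [pvWalkL]
    split_ifs with h
    · have := ih (x - 1) (by omega)
      omega
    · exact le_rfl

-- the walk's stop is blocked
lemma pvWalkStop (lst : List (List Int)) (done : List (Int × Int)) (y : Int) :
    ∀ (n : Nat) (x : Int), x.toNat = n →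
    ¬ (0 < pvWalkL lst done y x ∧ pvCell lst y (pvWalkL lst done y x - 1) ≠ 1 ∧
        ¬ (pvWalkL lst done y x - 1, y) ∈ done) := by
  intro n
  induction n with
  | zero =>
    intro x hx
    rw [pvWalkL, dif_neg (fun h => by omega)]
    rintro ⟨h1, _, _⟩
    omega
  | succ n ih =>
    intro x hx
    rw [pvWalkL]
    split_ifs with h
    · exact ih (x - 1) (by omega)
    · exact h

-- the walk stops exactly at f when f is blocked and nothing in (f, x] is
lemma pvWalkEq (lst : List (List Int)) (done : List (Int × Int)) (y : Int) (f : Int) :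
    ∀ (n : Nat) (x : Int), (x - f).toNat = n → f ≤ x →
    (f ≤ 0 ∨ pvCell lst y (f - 1) = 1 ∨ (f - 1, y) ∈ done) →
    (∀ c, f < c → c ≤ x → (0 < c ∧ pvCell lst y (c - 1) ≠ 1 ∧ ¬ (c - 1, y) ∈ done)) →
    pvWalkL lst done y x = f := by
  intro n
  induction n with
  | zero =>
    intro x hn hfx hb _
    have hx : x = f := by omega
    subst hx
    rw [pvWalkL, dif_neg]
    rintro ⟨h1, h2, h3⟩
    rcases hb with h | h | h
    · omega
    · exact h2 h
    · exact h3 h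
  | succ n ih =>
    intro x hn hfx hb hno
    have hfx' : f < x := by omega
    obtain ⟨h1, h2, h3⟩ := hno x hfx' le_rfl
    rw [pvWalkL, dif_pos ⟨h1, h2, h3⟩]
    exact ih (x - 1) (by omega) (by omega) hb (fun c hc1 hc2 => hno c hc1 (by omega))

-- the built barrier list is the map of its recursive spec
lemma pvBarrRowEq (row : List Int) :
    pvBarrRow row = (List.range (row.length + 1)).map (pvBarF row) := by
  unfold pvBarrRow
  have hr : PySem.List.pyRange 1 ((row.length : Int) + 1) 1
      = (List.range row.length).map (fun k : Nat => 1 + (k : Int)) := by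
    rw [PySem.List.pyRange_one]
    have e0 : ((row.length : Int) + 1 - 1).toNat = row.length := by omega
    rw [e0]
  rw [hr, List.foldl_map]
  have key : ∀ m : Nat, m ≤ row.length →
      (List.range m).foldl
        (fun b (k : Nat) => b ++ [if (PySem.List.pyGet? row ((1 + (k : Int)) - 1)).getD 0 = 1
            then 1 + (k : Int)
            else (PySem.List.pyGet? b ((1 + (k : Int)) - 1)).getD 0]) [0]
      = (List.range (m + 1)).map (pvBarF row) := by
    intro m
    induction m with
    | zero => intro _; simp [pvBarF]
    | succ m ih =>
      intro hm
      rw [List.range_succ, List.foldl_append, ih (by omega), List.foldl_cons, List.foldl_nil]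
      rw [List.range_succ (n := m + 1), List.map_append]
      congr 1
      have e1 : (1 + (m : Int)) - 1 = ((m : Nat) : Int) := by omega
      rw [e1, PySem.List.pyGet?_natCast, PySem.List.pyGet?_natCast]
      have e2 : ((List.range (m + 1)).map (pvBarF row))[m]? = some (pvBarF row m) := by
        rw [List.getElem?_map, List.getElem?_range (by omega)]
        rfl
      rw [e2]
      have e3 : (row[m]?).getD 0 = row.getD m 0 := by
        rw [List.getD_eq_getElem?_getD]
      rw [e3]
      simp only [List.map_cons, List.map_nil, Option.getD_some]
      show _ = [pvBarF row (m + 1)]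
      rw [pvBarF]
      have e4 : (1 : Int) + (m : Int) = (m : Int) + 1 := by omega
      rw [e4]
  exact key row.length le_rfl

-- 0 ≤ barF k ≤ k
lemma pvBarFBounds (row : List Int) (k : Nat) : 0 ≤ pvBarF row k ∧ pvBarF row k ≤ (k : Int) := by
  induction k with
  | zero => simp [pvBarF]
  | succ k ih =>
    rw [pvBarF]
    split_ifs
    · push_cast
      constructor <;> omega
    · push_cast
      constructor <;> omega

-- barF k is blocked (the west edge or a wall just to its west)
lemma pvBarFBlocked (row : List Int) (k : Nat) :
    pvBarF row k = 0 ∨ ∃ j : Nat, pvBarF row k = (j : Int) + 1 ∧ j < k ∧ row.getD j 0 = 1 := by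
  induction k with
  | zero => exact Or.inl rfl
  | succ k ih =>
    rw [pvBarF]
    split_ifs with h
    · exact Or.inr ⟨k, rfl, by omega, h⟩
    · rcases ih with h' | ⟨j, hj1, hj2, hj3⟩
      · exact Or.inl h'
      · exact Or.inr ⟨j, hj1, by omega, hj3⟩

-- no wall strictly between barF k and k
lemma pvBarFMax (row : List Int) (k : Nat) :
    ∀ c : Nat, pvBarF row k < (c : Int) → c ≤ k → row.getD (c - 1) 0 ≠ 1 := by
  induction k with
  | zero =>
    intro c h1 h2
    have h0 : pvBarF row 0 = 0 := rfl
    rw [h0] at h1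
    omega
  | succ k ih =>
    intro c h1 h2
    rw [pvBarF] at h1
    split_ifs at h1 with h
    · omega
    · by_cases hc : c = k + 1
      · subst hc
        simpa using h
      · exact ih c h1 (by omega)

-- pvCell through a present row in range
lemma pvCellRow (lst : List (List Int)) (y : Int) (row : List Int)
    (hrow : PySem.List.pyGet? lst y = some row) (j : Nat) (hj : j < row.length) :
    pvCell lst y (j : Int) = row.getD j 0 := by
  unfold pvCell
  rw [hrow]
  simp only [Option.bind_some]
  rw [PySem.List.pyGet?_natCast, List.getD_eq_getElem?_getD, List.getElem?_eq_getElem hj]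
  rfl

lemma pvCandOfNone (lastD : PySem.Dict Int Int) (y c0 : Int)
    (h : lastD.get? y = none) : pvCandOf lastD y c0 = c0 := by
  unfold pvCandOf
  rw [h]

lemma pvCandOfSome (lastD : PySem.Dict Int Int) (y c0 m : Int)
    (h : lastD.get? y = some m) :
    pvCandOf lastD y c0 = if c0 < m + 1 then m + 1 else c0 := by
  unfold pvCandOf
  rw [h]

-- B's closed formula equals A's walk, under the settled-prefix invariants
lemma pvFormulaEqWalk (lst : List (List Int)) (done : List (Int × Int))
    (lastD : PySem.Dict Int Int) (x y : Int) (row : List Int)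
    (hx : 0 < x)
    (hrow : PySem.List.pyGet? lst y = some row)
    (hlen : x ≤ (row.length : Int))
    (Hlast : ∀ b : Int, (lastD.get? b = none → ∀ a, (a, b) ∉ done) ∧
      (∀ m, lastD.get? b = some m → (m, b) ∈ done ∧ ∀ a, (a, b) ∈ done → a ≤ m))
    (Hle : ∀ d ∈ done, d.1 ≤ x)
    (Hinv : ∀ d ∈ done, 0 < d.1 → (pvCell lst d.2 (d.1 - 1) = 1 ∨ (d.1 - 1, d.2) ∈ done)) :
    (if pvCandOf lastD y ((PySem.List.pyGet? (pvBarrRow row) x).getD 0) < x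
     then pvCandOf lastD y ((PySem.List.pyGet? (pvBarrRow row) x).getD 0)
     else x) = pvWalkL lst done y x := by
  have hxle : x.toNat ≤ row.length := by omega
  have hcast : x = ((x.toNat : Nat) : Int) := by omega
  have hcand0 : (PySem.List.pyGet? (pvBarrRow row) x).getD 0 = pvBarF row x.toNat := by
    rw [pvBarrRowEq, hcast, PySem.List.pyGet?_natCast]
    rw [List.getElem?_map, List.getElem?_range (by omega)]
    rfl
  have hbb := pvBarFBounds row x.toNat
  have hbarx : pvBarF row x.toNat ≤ x := by omega
  have hbarBlocked : pvBarF row x.toNat ≤ 0 ∨ pvCell lst y (pvBarF row x.toNat - 1) = 1 := by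
    rcases pvBarFBlocked row x.toNat with h | ⟨j, hj1, hj2, hj3⟩
    · exact Or.inl (by omega)
    · refine Or.inr ?_
      have e : pvBarF row x.toNat - 1 = (j : Int) := by omega
      rw [e, pvCellRow lst y row hrow j (by omega)]
      exact hj3
  have hnoWall : ∀ c : Int, pvBarF row x.toNat < c → c ≤ x → pvCell lst y (c - 1) ≠ 1 := by
    intro c hc1 hc2
    have hc0 : 0 < c := by omega
    have e : c - 1 = ((c.toNat - 1 : Nat) : Int) := by omega
    rw [e, pvCellRow lst y row hrow (c.toNat - 1) (by omega)]
    exact pvBarFMax row x.toNat c.toNat (by omega) (by omega)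
  rw [hcand0]
  rcases hm : lastD.get? y with _ | m
  · -- no settled sheep in row y: the stop is the barrier value
    rw [pvCandOfNone lastD y _ hm]
    have hnone := (Hlast y).1 hm
    have hc : (if pvBarF row x.toNat < x then pvBarF row x.toNat else x)
        = pvBarF row x.toNat := by
      split_ifs with h
      · rfl
      · omega
    rw [hc]
    refine (pvWalkEq lst done y (pvBarF row x.toNat) (x - pvBarF row x.toNat).toNat x rfl
      hbarx ?_ ?_).symm
    · rcases hbarBlocked with h | h
      · exact Or.inl h
      · exact Or.inr (Or.inl h)
    · intro c hc1 hc2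
      exact ⟨by omega, hnoWall c hc1 hc2, fun hmem => hnone _ hmem⟩
  · -- a settled sheep exists; m is the row maximum
    rw [pvCandOfSome lastD y _ m hm]
    obtain ⟨hmem, hmax⟩ := (Hlast y).2 m hm
    have hmx : m ≤ x := Hle _ hmem
    by_cases hmeq : m = x
    · -- the maximum equals x: x itself is blocked, nothing moves
      have hm0 : 0 < m := by omega
      have hblock := Hinv _ hmem hm0
      rw [hmeq] at hblock
      have hinner : (if pvBarF row x.toNat < m + 1 then m + 1 else pvBarF row x.toNat)
          = m + 1 := by
        split_ifs with h
        · rfl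
        · omega
      rw [hinner, if_neg (by omega)]
      rw [pvWalkL, dif_neg]
      rintro ⟨h1, h2, h3⟩
      rcases hblock with h | h
      · exact h2 h
      · exact h3 h
    · -- m < x: the stop is max(barrier, m+1)
      have hmx' : m < x := by omega
      by_cases hbm : pvBarF row x.toNat < m + 1
      · -- the running max wins
        rw [if_pos hbm]
        have hc : (if m + 1 < x then m + 1 else x) = m + 1 := by
          split_ifs with h
          · rfl
          · omega
        rw [hc]
        refine (pvWalkEq lst done y (m + 1) (x - (m + 1)).toNat x rfl (by omega) ?_ ?_).symm
        · refine Or.inr (Or.inr ?_)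
          have e : m + 1 - 1 = m := by omega
          rw [e]
          exact hmem
        · intro c hc1 hc2
          refine ⟨by omega, hnoWall c (by omega) hc2, ?_⟩
          intro hmemc
          have := hmax _ hmemc
          omega
      · -- the barrier wins
        rw [if_neg hbm]
        have hc : (if pvBarF row x.toNat < x then pvBarF row x.toNat else x)
            = pvBarF row x.toNat := by
          split_ifs with h
          · rfl
          · omega
        rw [hc]
        refine (pvWalkEq lst done y (pvBarF row x.toNat) (x - pvBarF row x.toNat).toNat x rfl
          hbarx ?_ ?_).symm
        · rcases hbarBlocked with h | h
          · exact Or.inl h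
          · exact Or.inr (Or.inl h)
        · intro c hc1 hc2
          refine ⟨by omega, hnoWall c hc1 hc2, ?_⟩
          intro hmemc
          have := hmax _ hmemc
          omega

-- the `last` invariant survives settling one sheep at w in row y
lemma pvLastMaintain (done : List (Int × Int)) (lastD : PySem.Dict Int Int) (y w : Int)
    (Hlast : ∀ b : Int, (lastD.get? b = none → ∀ a, (a, b) ∉ done) ∧
      (∀ m, lastD.get? b = some m → (m, b) ∈ done ∧ ∀ a, (a, b) ∈ done → a ≤ m))
    (hwmax : ∀ m, lastD.get? y = some m → m ≤ w) :
    ∀ b : Int, ((lastD.insert y w).get? b = none → ∀ a, (a, b) ∉ done ++ [(w, y)]) ∧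
      (∀ m, (lastD.insert y w).get? b = some m →
        (m, b) ∈ done ++ [(w, y)] ∧ ∀ a, (a, b) ∈ done ++ [(w, y)] → a ≤ m) := by
  intro b
  rw [PySem.Dict.get?_insert]
  by_cases hb : b = y
  · rw [if_pos hb]
    constructor
    · intro h
      simp at h
    · intro m hm
      injection hm with hm
      subst hm hb
      constructor
      · exact List.mem_append_right _ (by simp)
      · intro a ha
        rcases List.mem_append.mp ha with h | h
        · rcases he : lastD.get? b with _ | m'
          · exact absurd h ((Hlast b).1 he a)
          · have h2 := ((Hlast b).2 m' he).2 a h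
            have h3 := hwmax m' he
            omega
        · simp at h
          omega
  · rw [if_neg hb]
    constructor
    · intro h a ha
      rcases List.mem_append.mp ha with h' | h'
      · exact (Hlast b).1 h a h'
      · simp at h'
        exact hb h'.2
    · intro m hm
      have h2 := (Hlast b).2 m hm
      constructor
      · exact List.mem_append_left _ h2.1
      · intro a ha
        rcases List.mem_append.mp ha with h' | h'
        · exact h2.2 a h'
        · simp at h'
          exact absurd h'.2 hb

-- the blockedness invariant survives settling one sheep at a blocked position
lemma pvInvMaintain (lst : List (List Int)) (done : List (Int × Int)) (y w : Int)
    (Hinv : ∀ d ∈ done, 0 < d.1 → (pvCell lst d.2 (d.1 - 1) = 1 ∨ (d.1 - 1, d.2) ∈ done))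
    (hwblock : 0 < w → (pvCell lst y (w - 1) = 1 ∨ (w - 1, y) ∈ done)) :
    ∀ d ∈ done ++ [(w, y)], 0 < d.1 →
      (pvCell lst d.2 (d.1 - 1) = 1 ∨ (d.1 - 1, d.2) ∈ done ++ [(w, y)]) := by
  intro d hd h0
  rcases List.mem_append.mp hd with h | h
  · rcases Hinv d h h0 with hc | hmem
    · exact Or.inl hc
    · exact Or.inr (List.mem_append_left _ hmem)
  · simp at h
    subst h
    rcases hwblock h0 with hc | hmem
    · exact Or.inl hc
    · exact Or.inr (List.mem_append_left _ hmem)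

-- the barrier-cache invariant survives pvBarrOf
lemma pvBarrMaintain (lst : List (List Int)) (barrD : PySem.Dict Int (List Int)) (y : Int)
    (Hbarr : ∀ b : Int, barrD.get? b = none ∨
      barrD.get? b = some (pvBarrRow ((PySem.List.pyGet? lst b).getD []))) :
    ∀ b : Int, (pvBarrOf lst barrD y).get? b = none ∨
      (pvBarrOf lst barrD y).get? b = some (pvBarrRow ((PySem.List.pyGet? lst b).getD [])) := by
  intro b
  unfold pvBarrOf
  split_ifs with hbs
  · exact Hbarr b
  · rw [PySem.Dict.get?_insert]
    split_ifs with hb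
    · subst hb
      exact Or.inr rfl
    · exact Hbarr b

-- the outer loops agree step by step
lemma pvOuter (lst : List (List Int)) :
    ∀ (pend done : List (Int × Int)) (barrD : PySem.Dict Int (List Int))
      (lastD : PySem.Dict Int Int),
    pend.Pairwise (fun a b => a.1 ≤ b.1) →
    (∀ p ∈ pend, p.1 < (((lst.getD 0 []).length : Nat) : Int) ∧
      (0 < p.1 → (PySem.List.pyGet? lst p.2).isSome ∧
        p.1 ≤ ((((PySem.List.pyGet? lst p.2).getD []).length : Nat) : Int))) →
    (∀ d ∈ done, ∀ q ∈ pend, d.1 ≤ q.1) →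
    (∀ b : Int, (lastD.get? b = none → ∀ a, (a, b) ∉ done) ∧
      (∀ m, lastD.get? b = some m → (m, b) ∈ done ∧ ∀ a, (a, b) ∈ done → a ≤ m)) →
    (∀ d ∈ done, 0 < d.1 → (pvCell lst d.2 (d.1 - 1) = 1 ∨ (d.1 - 1, d.2) ∈ done)) →
    (∀ b : Int, barrD.get? b = none ∨
      barrD.get? b = some (pvBarrRow ((PySem.List.pyGet? lst b).getD []))) →
    (List.range' done.length pend.length).foldl (pvAOuter lst) (done ++ pend)
      = (pend.foldl (pvBStep lst) (barrD, lastD, done)).2.2 := by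
  intro pend
  induction pend with
  | nil => intro done barrD lastD _ _ _ _ _ _; simp
  | cons p pend' ih =>
    intro done barrD lastD hpw hw Hle Hlast Hinv Hbarr
    obtain ⟨x, y⟩ := p
    rw [List.length_cons, List.range'_succ, List.foldl_cons, List.foldl_cons]
    have hpair : ∀ q ∈ pend', x ≤ q.1 := (List.pairwise_cons.mp hpw).1
    have hhead := hw (x, y) List.mem_cons_self
    -- A's step settles the head at the walk's stop
    have hstepA : pvAOuter lst (done ++ (x, y) :: pend') done.length
        = done ++ (pvWalkL lst done y x, y) :: pend' := by
      unfold pvAOuter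
      rw [pvGetShape]
      simp only [pvFoldlRangeConst]
      rw [pvInner lst done pend' y x hpair _ x le_rfl hhead.1 (by omega)]
    rw [hstepA]
    -- shared facts about the stop
    have hwle : pvWalkL lst done y x ≤ x := pvWalkLe lst done y x.toNat x rfl
    have hwblock : 0 < pvWalkL lst done y x →
        (pvCell lst y (pvWalkL lst done y x - 1) = 1 ∨ (pvWalkL lst done y x - 1, y) ∈ done) := by
      intro h0
      have hst := pvWalkStop lst done y x.toNat x rfl
      by_cases hc : pvCell lst y (pvWalkL lst done y x - 1) = 1
      · exact Or.inl hc
      · right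
        by_contra hmem
        exact hst ⟨h0, hc, hmem⟩
    have Hle' : ∀ d ∈ done, d.1 ≤ x := fun d hd => Hle d hd (x, y) List.mem_cons_self
    have HleM : ∀ w' : Int, w' ≤ x → ∀ d ∈ done ++ [(w', y)], ∀ q ∈ pend', d.1 ≤ q.1 := by
      intro w' hwx d hd q hq
      rcases List.mem_append.mp hd with h | h
      · exact Hle d h q (List.mem_cons_of_mem _ hq)
      · simp at h
        subst h
        exact le_trans hwx (hpair q hq)
    by_cases hx : x ≤ 0
    · -- no move possible: the walk stops at x immediately and B writes x back
      have hwx : pvWalkL lst done y x = x := by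
        rw [pvWalkL, dif_neg (fun h => by omega)]
      have hB : pvBStep lst (barrD, lastD, done) (x, y)
          = (barrD, lastD.insert y x, done ++ [(x, y)]) := by
        simp [pvBStep, hx]
      rw [hB, hwx]
      have hre : done ++ (x, y) :: pend' = (done ++ [(x, y)]) ++ pend' := by simp
      rw [hre]
      have hlen : done.length + 1 = (done ++ [(x, y)]).length := by simp
      rw [hlen]
      exact ih (done ++ [(x, y)]) barrD (lastD.insert y x)
        (List.pairwise_cons.mp hpw).2
        (fun q hq => hw q (List.mem_cons_of_mem _ hq))
        (HleM x le_rfl)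
        (pvLastMaintain done lastD y x Hlast
          (fun m hm => Hle' _ ((Hlast y).2 m hm).1))
        (pvInvMaintain lst done y x Hinv (by rw [← hwx]; exact hwblock))
        Hbarr
    · -- the sheep moves: B's closed formula computes the walk's stop
      have hx' : 0 < x := by omega
      obtain ⟨hsome, hxlen⟩ := hhead.2 hx'
      obtain ⟨row, hrow⟩ := Option.isSome_iff_exists.mp hsome
      have hgetD : (PySem.List.pyGet? lst y).getD [] = row := by rw [hrow]; rfl
      have hbarr'y : (pvBarrOf lst barrD y).get? y = some (pvBarrRow row) := by
        unfold pvBarrOf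
        split_ifs with hbs
        · rcases Hbarr y with h | h
          · rw [h] at hbs
            simp at hbs
          · rw [h, hgetD]
        · rw [PySem.Dict.get?_insert_self, hgetD]
      have hB : pvBStep lst (barrD, lastD, done) (x, y)
          = (pvBarrOf lst barrD y,
             lastD.insert y (if pvCandOf lastD y
                 ((PySem.List.pyGet? (((pvBarrOf lst barrD y).get? y).getD []) x).getD 0) < x
               then pvCandOf lastD y
                 ((PySem.List.pyGet? (((pvBarrOf lst barrD y).get? y).getD []) x).getD 0)
               else x),
             done ++ [((if pvCandOf lastD y
                 ((PySem.List.pyGet? (((pvBarrOf lst barrD y).get? y).getD []) x).getD 0) < x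
               then pvCandOf lastD y
                 ((PySem.List.pyGet? (((pvBarrOf lst barrD y).get? y).getD []) x).getD 0)
               else x), y)]) := by
        simp only [pvBStep]
        rw [if_neg hx]
      have hc0 : ((PySem.List.pyGet? (((pvBarrOf lst barrD y).get? y).getD []) x).getD 0)
          = (PySem.List.pyGet? (pvBarrRow row) x).getD 0 := by
        rw [hbarr'y]
        rfl
      rw [hc0] at hB
      have hlenrow : x ≤ (row.length : Int) := by
        rw [hgetD] at hxlen
        exact_mod_cast hxlen
      have hnx : (if pvCandOf lastD y ((PySem.List.pyGet? (pvBarrRow row) x).getD 0) < x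
          then pvCandOf lastD y ((PySem.List.pyGet? (pvBarrRow row) x).getD 0)
          else x) = pvWalkL lst done y x :=
        pvFormulaEqWalk lst done lastD x y row hx' hrow hlenrow Hlast Hle' Hinv
      rw [hnx] at hB
      rw [hB]
      have hre : done ++ (pvWalkL lst done y x, y) :: pend'
          = (done ++ [(pvWalkL lst done y x, y)]) ++ pend' := by simp
      rw [hre]
      have hlen : done.length + 1 = (done ++ [(pvWalkL lst done y x, y)]).length := by simp
      rw [hlen]
      exact ih (done ++ [(pvWalkL lst done y x, y)]) (pvBarrOf lst barrD y)
        (lastD.insert y (pvWalkL lst done y x))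
        (List.pairwise_cons.mp hpw).2
        (fun q hq => hw q (List.mem_cons_of_mem _ hq))
        (HleM _ hwle)
        (pvLastMaintain done lastD y (pvWalkL lst done y x) Hlast
          (by
            intro m hm
            have hmem := ((Hlast y).2 m hm).1
            have hmx : m ≤ x := Hle' _ hmem
            have hge : m + 1 ≤ pvCandOf lastD y
                ((PySem.List.pyGet? (pvBarrRow row) x).getD 0) := by
              rw [pvCandOfSome lastD y _ m hm]
              split_ifs <;> omega
            rw [← hnx]
            split_ifs <;> omega))
        (pvInvMaintain lst done y (pvWalkL lst done y x) Hinv hwblock)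
        (pvBarrMaintain lst barrD y Hbarr)

-- ===== VERDICT (by name: the statement is the Claim_ definition above) =====
theorem Gauche_spec : Claim_equal_Gauche := by
  intro moutons lst _ hpre
  unfold Spec_Gauche Gauche Gauche_alt
  have hperm := PySem.List.sorted_perm moutons (fun t : Int × Int => t.1) false
  have h := pvOuter lst (PySem.List.sorted moutons (fun t : Int × Int => t.1) false) []
    PySem.Dict.empty PySem.Dict.empty
    (PySem.List.sorted_pairwise moutons (fun t : Int × Int => t.1))
    (by
      intro p hp
      have hp' := hpre p (hperm.mem_iff.mp hp)
      exact ⟨hp'.2.1, hp'.2.2⟩)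
    (by intro d hd; simp at hd)
    (by
      intro b
      constructor
      · intro _ a hmem
        simp at hmem
      · intro m hm
        simp [PySem.Dict.get?_empty] at hm)
    (by intro d hd; simp at hd)
    (by intro b; exact Or.inl (by simp [PySem.Dict.get?_empty]))
  simpa [List.range_eq_range'] using h
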